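-- pv_equiv track=rewrite | github.com/Coding-Test-Study-Group/Coding-Test-Study | yunhwan/프로그래머스 오픈채팅방.py | solution
-- ===== SOURCE A (Python) =====
-- def solution(record):
--     answer = []
--     dic_id = {}
--
--     #1. record를 띄어쓰기 기준으로 나눠주기
--     #2. record_list를 순회
--     #3. uid에 따른 닉네임을 딕셔너리에 저장 및 갱신
--     #4. record_list를 순회하며 결과추가
--
--     #record를 띄어쓰기 기준으로 나눠주기
--     record_list = [ record[i].split(' ') for i in range(len(record))]
--
--     #record_list를 순회
--     for i in record_list:
--         #uid에 따른 닉네임을 딕셔너리에 저장 및 갱신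
--         if i[0]=='Enter' or i[0]=='Change' :
--             dic_id[i[1]] = i[2]
--
--     #record_list를 순회하며 결과추가
--     for i in record_list:
--         if i[0]=='Enter':
--             answer.append(dic_id[i[1]]+ '님이 들어왔습니다.')
--         if i[0]=='Leave':
--             answer.append(dic_id[i[1]]+ '님이 나갔습니다.')
--
--     return answer
-- ===== SOURCE B (Python) =====
-- def solution(record):
--     toks = [line.split(' ') for line in record]
--
--     def final_name(uid):
--         # last Enter/Change for uid wins: scan from the back, first hit is the final nickname
--         for t in reversed(toks):
--             if t[0] in ('Enter', 'Change') and t[1] == uid: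
--                 return t[2]
--
--     return [final_name(t[1]) + ('님이 들어왔습니다.' if t[0] == 'Enter' else '님이 나갔습니다.')
--             for t in toks if t[0] in ('Enter', 'Leave')]
-- ===== Notes on version B (the rewrite author's own statement) =====
-- stated objective: alternative
-- what changed: B drops the nickname dictionary entirely: for each Enter/Leave line it finds the final nickname by scanning the record backwards for the last Enter/Change of that uid, and emits the answer as one filtered comprehension, trading A's O(n) hash-map build-then-lookup for a dictionary-free O(n^2) backward search.
import Mathlib
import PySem

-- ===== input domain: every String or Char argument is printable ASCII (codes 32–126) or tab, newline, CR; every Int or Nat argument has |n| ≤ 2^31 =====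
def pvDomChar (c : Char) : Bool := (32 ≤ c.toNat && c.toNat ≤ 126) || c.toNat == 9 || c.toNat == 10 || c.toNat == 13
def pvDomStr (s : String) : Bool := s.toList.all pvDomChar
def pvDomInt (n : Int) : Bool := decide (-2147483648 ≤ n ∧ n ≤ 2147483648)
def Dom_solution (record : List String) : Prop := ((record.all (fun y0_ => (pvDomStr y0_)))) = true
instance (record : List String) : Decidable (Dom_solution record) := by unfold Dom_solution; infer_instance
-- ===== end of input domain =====

-- B replaces A's nickname dictionary with a per-message backward scan of the record for the
-- last Enter/Change of the uid, emitting the answer as one filtered comprehension (alternative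
-- algorithm, not claimed faster).


-- ===== PORT A =====
-- s.split(' '): exact for the nonempty separator ' ' (split? is none only for sep = "")
def pySplitSp (s : String) : List String := (PySem.Str.split? s " ").getD []

-- first loop body: dic_id[i[1]] = i[2] for Enter/Change
def aStepDict (d : PySem.Dict String String) (i : List String) : PySem.Dict String String :=
  if PySem.List.pyGetD i 0 "" == "Enter" || PySem.List.pyGetD i 0 "" == "Change" then
    d.insert (PySem.List.pyGetD i 1 "") (PySem.List.pyGetD i 2 "")
  else d

-- second loop body: two sequential ifs appending the messages
def aStepAns (dic : PySem.Dict String String) (ans : List String) (i : List String) : List String :=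
  let ans := if PySem.List.pyGetD i 0 "" == "Enter" then
               ans ++ [dic.getD (PySem.List.pyGetD i 1 "") "" ++ "님이 들어왔습니다."] else ans
  if PySem.List.pyGetD i 0 "" == "Leave" then
    ans ++ [dic.getD (PySem.List.pyGetD i 1 "") "" ++ "님이 나갔습니다."] else ans

def solution (record : List String) : List String :=
  let record_list := (PySem.List.pyRange 0 record.length 1).map
    (fun i => pySplitSp (PySem.List.pyGetD record i ""))
  let dic := record_list.foldl aStepDict PySem.Dict.empty
  record_list.foldl (aStepAns dic) []

-- ===== PORT B =====
-- final_name: scan reversed(toks) and return t[2] of the first Enter/Change with t[1] == uid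
-- ("" for Python's None fall-through return, which only happens outside Pre_solution)
def bFinalName (toks : List (List String)) (uid : String) : String :=
  match toks.reverse.find? (fun t =>
      (PySem.List.pyGetD t 0 "" == "Enter" || PySem.List.pyGetD t 0 "" == "Change") &&
      PySem.List.pyGetD t 1 "" == uid) with
  | some t => PySem.List.pyGetD t 2 ""
  | none => ""

-- the filtered comprehension: keep Enter/Leave lines, emit name + chosen suffix
def solution_alt (record : List String) : List String :=
  let toks := record.map pySplitSp
  toks.filterMap (fun t =>
    if PySem.List.pyGetD t 0 "" == "Enter" || PySem.List.pyGetD t 0 "" == "Leave" then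
      some (bFinalName toks (PySem.List.pyGetD t 1 "") ++
        (if PySem.List.pyGetD t 0 "" == "Enter" then "님이 들어왔습니다." else "님이 나갔습니다."))
    else none)

-- ===== PRECONDITION & SPEC =====
-- Pre_ excludes exactly the inputs where Python A raises: an Enter/Change line (first
-- token "Enter"/"Change", i.e. the line is that word or starts with it plus a space) with
-- fewer than 3 space-separated tokens (IndexError on i[2]), and a Leave line with no
-- token i[1] or whose uid never appears in any Enter/Change line (KeyError on dic_id[i[1]]).
def Pre_solution (record : List String) : Prop :=
  ∀ r ∈ record,
    ((r = "Enter" ∨ PySem.Str.startswith r "Enter " = true ∨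
      r = "Change" ∨ PySem.Str.startswith r "Change " = true) →
        3 ≤ (pySplitSp r).length) ∧
    ((r = "Leave" ∨ PySem.Str.startswith r "Leave " = true) →
        2 ≤ (pySplitSp r).length ∧
        ∃ r' ∈ record,
          (r' = "Enter" ∨ PySem.Str.startswith r' "Enter " = true ∨
           r' = "Change" ∨ PySem.Str.startswith r' "Change " = true) ∧
          PySem.List.pyGetD (pySplitSp r') 1 "" = PySem.List.pyGetD (pySplitSp r) 1 "")
instance (record : List String) : Decidable (Pre_solution record) := by
  unfold Pre_solution; infer_instance

def pvWitness_solution : List String := ["Enter uid1 muzi", "Leave uid1"]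

def Spec_solution (record : List String) (out : List String) : Prop := out = solution_alt record
instance (record : List String) (out : List String) : Decidable (Spec_solution record out) := by unfold Spec_solution; infer_instance

-- ===== CLAIM (what is proved, stated in full; the proofs are below) =====
def Claim_equal_solution : Prop := ∀ (record : List String), Dom_solution record → Pre_solution record → Spec_solution record (solution record)

-- ===== LEMMAS AND PROOFS =====

-- the predicate B's backward scan tests
def bPred (uid : String) (t : List String) : Bool :=
  (PySem.List.pyGetD t 0 "" == "Enter" || PySem.List.pyGetD t 0 "" == "Change") &&
  PySem.List.pyGetD t 1 "" == uid

-- A's dict after the first fold answers every getD like B's backward scan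
lemma dict_eq_scan (toks : List (List String)) (d : PySem.Dict String String) (uid : String) :
    (toks.foldl aStepDict d).getD uid "" =
      match toks.reverse.find? (bPred uid) with
      | some t => PySem.List.pyGetD t 2 ""
      | none => d.getD uid "" := by
  induction toks generalizing d with
  | nil => simp
  | cons t ts ih =>
    simp only [List.foldl, List.reverse_cons, List.find?_append]
    rw [ih]
    cases h : ts.reverse.find? (bPred uid) with
    | some u => simp
    | none =>
      simp only [Option.none_or]
      unfold aStepDict bPred
      by_cases hc : (PySem.List.pyGetD t 0 "" == "Enter" || PySem.List.pyGetD t 0 "" == "Change") = true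
      · by_cases hu : PySem.List.pyGetD t 1 "" = uid
        · simp [hc, hu, PySem.Dict.getD_insert_self]
        · have : (PySem.List.pyGetD t 1 "" == uid) = false := by simp [hu]
          simp [hc, this]
          exact PySem.Dict.getD_insert_of_ne _ _ _ (fun e => hu e.symm)
      · simp only [Bool.not_eq_true] at hc
        simp [hc]

lemma final_name_eq (toks : List (List String)) (uid : String) :
    bFinalName toks uid = (toks.foldl aStepDict PySem.Dict.empty).getD uid "" := by
  rw [dict_eq_scan]
  unfold bFinalName bPred
  cases toks.reverse.find? _ <;> simp [PySem.Dict.empty, PySem.Dict.getD, PySem.Dict.get?]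

-- the message(s) one split line contributes, given the final-name function
def msgOf (name : String → String) (t : List String) : List String :=
  if PySem.List.pyGetD t 0 "" == "Enter" then [name (PySem.List.pyGetD t 1 "") ++ "님이 들어왔습니다."]
  else if PySem.List.pyGetD t 0 "" == "Leave" then [name (PySem.List.pyGetD t 1 "") ++ "님이 나갔습니다."]
  else []

lemma aStepAns_eq (dic : PySem.Dict String String) (ans : List String) (t : List String) :
    aStepAns dic ans t = ans ++ msgOf (fun u => dic.getD u "") t := by
  simp only [aStepAns, msgOf]
  split_ifs with h1 h2 h2 <;> simp_all

lemma aFold_ans (dic : PySem.Dict String String) (rl : List (List String)) (ans : List String) :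
    rl.foldl (aStepAns dic) ans = ans ++ rl.flatMap (msgOf (fun u => dic.getD u "")) := by
  induction rl generalizing ans with
  | nil => simp
  | cons t ts ih =>
    simp only [List.foldl, List.flatMap_cons]
    rw [ih, aStepAns_eq, List.append_assoc]

-- B's filterMap body produces exactly msgOf with bFinalName
lemma filterMap_eq_flatMap_msg (toks : List (List String)) :
    toks.filterMap (fun t =>
      if PySem.List.pyGetD t 0 "" == "Enter" || PySem.List.pyGetD t 0 "" == "Leave" then
        some (bFinalName toks (PySem.List.pyGetD t 1 "") ++
          (if PySem.List.pyGetD t 0 "" == "Enter" then "님이 들어왔습니다." else "님이 나갔습니다."))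
      else none) = toks.flatMap (msgOf (bFinalName toks)) := by
  rw [List.filterMap_eq_flatMap_toList]
  refine List.flatMap_congr (fun t _ => ?_)
  unfold msgOf
  split_ifs with h1 h2 h3 h4 <;> simp_all

lemma record_list_eq (record : List String) :
    (PySem.List.pyRange 0 record.length 1).map
      (fun i => pySplitSp (PySem.List.pyGetD record i "")) =
    record.map (fun r => pySplitSp r) := by
  have : (PySem.List.pyRange 0 record.length 1).map
      (fun i => pySplitSp (PySem.List.pyGetD record i "")) =
      ((PySem.List.pyRange 0 record.length 1).map (fun i => PySem.List.pyGetD record i "")).map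
        (fun r => pySplitSp r) := by
    rw [List.map_map]; rfl
  rw [this]
  have h := PySem.List.map_pyGetD_pyRange_zero (xs := record) (d := "")
  simp only [PySem.List.len] at h
  rw [h]

-- ===== VERDICT (by name: the statement is the Claim_ definition above) =====
theorem solution_spec : Claim_equal_solution := by
  intro record _ _
  unfold Spec_solution solution solution_alt
  simp only [record_list_eq, filterMap_eq_flatMap_msg, aFold_ans, List.nil_append]
  refine List.flatMap_congr (fun t _ => ?_)
  unfold msgOf
  simp only [final_name_eq]
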